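-- pv_equiv track=rewrite | github.com/Sumanta01/Python_DSA | Number_Pattern_4.py | numberPattern
-- ===== SOURCE A (Python) =====
-- def numberPattern(n):
--
--
--     res=[[]for k in range(n)]
--     for i in range(n):
--         ans=""
--         for j in range (i+1):
--             if j==0 or j==i:
--                 ans=ans+"1"
--             else:
--                 ans=ans+"2"
--         res[i].append(ans)
--     return res
-- ===== SOURCE B (Python) =====
-- def numberPattern(n):
--     return [["1"] if i == 0 else ["1" + "2" * (i - 1) + "1"] for i in range(n)]
-- ===== Notes on version B (the rewrite author's own statement) =====
-- stated objective: simpler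
-- what changed: Replaces the mutate-res-by-index outer loop and the character-by-character inner branch loop with a single comprehension using the closed-form row string '1' + '2'*(i-1) + '1' (['1'] at i==0).
import Mathlib
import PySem

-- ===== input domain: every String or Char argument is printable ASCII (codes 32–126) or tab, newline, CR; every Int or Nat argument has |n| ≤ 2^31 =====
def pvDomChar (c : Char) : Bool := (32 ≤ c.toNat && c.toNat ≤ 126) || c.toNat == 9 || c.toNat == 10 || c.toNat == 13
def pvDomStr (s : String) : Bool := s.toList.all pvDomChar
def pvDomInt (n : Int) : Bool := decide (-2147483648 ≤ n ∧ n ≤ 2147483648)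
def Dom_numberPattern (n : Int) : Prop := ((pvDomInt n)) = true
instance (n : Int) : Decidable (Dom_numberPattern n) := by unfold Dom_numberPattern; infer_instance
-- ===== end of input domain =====

-- B replaces A's mutate-res-at-index loop and char-by-char inner loop with a single map
-- using a closed-form row string ("1", else "1" ++ "2"*(i-1) ++ "1"); objective: simpler.


-- ===== PORT A =====
-- A: builds res as n empty lists, then for each i builds the row char by char and appends it at res[i].
def pvRowA (i : Int) : String :=
  (PySem.List.pyRange 0 (i + 1) 1).foldl
    (fun ans j => if j = 0 ∨ j = i then ans ++ "1" else ans ++ "2") ""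

def numberPattern (n : Int) : List (List String) :=
  -- res = [[] for k in range(n)]
  let res0 : List (List String) := (PySem.List.pyRange 0 n 1).map (fun _ => [])
  -- for i in range(n): … ; res[i].append(ans)   (i is always a valid nonnegative index, so .toNat is exact)
  (PySem.List.pyRange 0 n 1).foldl
    (fun res i => res.set i.toNat ((res.getD i.toNat []) ++ [pvRowA i])) res0

-- ===== PORT B =====
-- B: comprehension with a closed-form row string.
def numberPattern_alt (n : Int) : List (List String) :=
  (PySem.List.pyRange 0 n 1).map
    (fun i => if i = 0 then ["1"]
              else ["1" ++ String.ofList (List.replicate (i - 1).toNat '2') ++ "1"])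

-- ===== PRECONDITION & SPEC =====
def Spec_numberPattern (n : Int) (out : List (List String)) : Prop := out = numberPattern_alt n
instance (n : Int) (out : List (List String)) : Decidable (Spec_numberPattern n out) := by unfold Spec_numberPattern; infer_instance

-- ===== CLAIM (what is proved, stated in full; the proofs are below) =====
def Claim_equal_numberPattern : Prop := ∀ (n : Int), Dom_numberPattern n → Spec_numberPattern n (numberPattern n)

-- ===== LEMMAS AND PROOFS =====

-- inner loop invariant: over range(k) with 1 ≤ k ≤ m the branch never hits j = m (except j = 0),
-- so the fold yields '1' followed by k-1 copies of '2'
theorem pvInner_inv (m k : Nat) (h1 : 1 ≤ k) (hk : k ≤ m)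
    (step : String → Int → String)
    (hstep : step = fun ans j => if j = 0 ∨ j = (m : Int) then ans ++ "1" else ans ++ "2") :
    (PySem.List.pyRange 0 (k : Int) 1).foldl step ""
      = String.ofList ('1' :: List.replicate (k - 1) '2') := by
  induction k with
  | zero => omega
  | succ k ih =>
    by_cases hk0 : k = 0
    · subst hk0
      rw [show ((1 : Nat) : Int) = 0 + 1 by norm_num,
        PySem.List.pyRange_one_succ_right le_rfl, PySem.List.pyRange_one_eq_nil le_rfl]
      simp [hstep]
    · have hm : 1 ≤ k := by omega
      rw [show ((k + 1 : Nat) : Int) = (k : Int) + 1 by push_cast; ring,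
        PySem.List.pyRange_one_succ_right (by positivity), List.foldl_append,
        ih hm (by omega)]
      have hne0 : (k : Int) ≠ 0 := by exact_mod_cast hk0
      have hnem : (k : Int) ≠ (m : Int) := by
        have : k ≠ m := by omega
        exact_mod_cast this
      simp only [List.foldl, hstep, hne0, hnem, or_self, if_false]
      rw [show ("2" : String) = String.ofList ['2'] by decide, ← String.ofList_append]
      congr 1
      simp [show k + 1 - 1 = (k - 1) + 1 by omega, List.replicate_succ']

-- the row A builds equals B's closed form
theorem pvRowA_eq (m : Nat) :
    pvRowA (m : Int)
      = (if (m : Int) = 0 then "1"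
         else "1" ++ String.ofList (List.replicate ((m : Int) - 1).toNat '2') ++ "1") := by
  unfold pvRowA
  by_cases hm : m = 0
  · subst hm
    rw [show ((0 : Nat) : Int) + 1 = 0 + 1 by norm_num,
      PySem.List.pyRange_one_succ_right le_rfl, PySem.List.pyRange_one_eq_nil le_rfl]
    decide
  · have h1 : (1 : Nat) ≤ m := by omega
    rw [PySem.List.pyRange_one_succ_right (by positivity), List.foldl_append,
      pvInner_inv m m h1 le_rfl _ rfl]
    have hne0 : (m : Int) ≠ 0 := by exact_mod_cast hm
    simp only [List.foldl, hne0, or_true, if_true, if_false]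
    rw [show ("1" : String) = String.ofList ['1'] by decide]
    simp only [← String.ofList_append]
    congr 1
    rw [show ((m : Int) - 1).toNat = m - 1 by omega]
    simp

-- the filled prefix of res, written with Int.ofNat to keep the cast explicit
def pvRows (k : Nat) : List (List String) :=
  (List.range k).map (fun i => [pvRowA (Int.ofNat i)])

-- outer loop invariant: after processing indices 0..k-1 the first k slots are filled, the rest still empty
theorem pvOuter_inv (m k : Nat) (hk : k ≤ m) :
    (PySem.List.pyRange 0 (k : Int) 1).foldl
        (fun res i => res.set i.toNat ((res.getD i.toNat []) ++ [pvRowA i]))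
        (List.replicate m ([] : List String))
      = pvRows k ++ List.replicate (m - k) ([] : List String) := by
  induction k with
  | zero => simp [pvRows]
  | succ k ih =>
    rw [show ((k + 1 : Nat) : Int) = (k : Int) + 1 by push_cast; ring,
      PySem.List.pyRange_one_succ_right (by positivity), List.foldl_append,
      ih (by omega)]
    simp only [List.foldl]
    have hlen : (pvRows k).length = k := by simp [pvRows]
    have hmk : m - k = (m - (k + 1)) + 1 := by omega
    rw [show ((k : Int)).toNat = k by omega,
      List.getD_append_right _ _ _ _ (by omega), List.set_append]
    simp only [hlen, Nat.sub_self, lt_irrefl, if_false, hmk, List.replicate_succ,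
      List.getD_cons_zero, List.set_cons_zero]
    rw [show pvRows (k + 1) = pvRows k ++ [[pvRowA (Int.ofNat k)]] by
      simp [pvRows, List.range_succ]]
    simp [Int.ofNat_eq_natCast]

theorem pvMain (n : Int) : numberPattern n = numberPattern_alt n := by
  unfold numberPattern numberPattern_alt
  by_cases hn : n ≤ 0
  · rw [PySem.List.pyRange_one_eq_nil hn]
    simp
  · obtain ⟨m, hm⟩ : ∃ m : Nat, n = (m : Int) := ⟨n.toNat, by omega⟩
    subst hm
    have h0 : ((PySem.List.pyRange 0 (m : Int) 1).map (fun _ => ([] : List String)))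
        = List.replicate m [] := by
      rw [List.map_const', PySem.List.length_pyRange_one,
        show ((m : Int) - 0).toNat = m by omega]
    rw [h0, pvOuter_inv m m le_rfl]
    simp only [Nat.sub_self, List.replicate_zero, List.append_nil]
    rw [PySem.List.pyRange_zero_natCast m, List.map_map]
    unfold pvRows
    refine List.map_congr_left ?_
    intro i _
    simp only [Function.comp_apply, Int.ofNat_eq_natCast]
    rw [pvRowA_eq i]
    split_ifs <;> rfl

-- ===== VERDICT (by name: the statement is the Claim_ definition above) =====
theorem numberPattern_spec : Claim_equal_numberPattern := by
  intro n _
  unfold Spec_numberPattern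
  exact pvMain n
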